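-- pv_equiv track=rewrite | github.com/yichen14/SimpleSDXL | enhanced/wildcards.py | apply_arrays
-- ===== SOURCE A (Python) =====
-- import math
--
-- def get_words(arrays, totalMult, index):
--     if(len(arrays) == 1):
--         return [arrays[0][index]]
--     else:
--         words = arrays[0]
--         word = words[index % len(words)]
--         index -= index % len(words)
--         index /= len(words)
--         index = math.floor(index)
--         return [word] + get_words(arrays[1:], math.floor(totalMult/len(words)), index)
--
-- def apply_arrays(text, index, arrays, mult):
--     if len(arrays) == 0:
--         return text
--
--     index %= mult
--     chosen_words = get_words(arrays, mult, index)
--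
--     i = 0
--     for arr in arrays:
--         text = text.replace(f'[{",".join(arr)}]', chosen_words[i], 1)
--         i = i+1
--
--     return text
-- ===== SOURCE B (Python) =====
-- def apply_arrays(text, index, arrays, mult):
--     if len(arrays) == 0:
--         return text
--     index %= mult
--     for arr in arrays[:-1]:
--         word = arr[index % len(arr)]
--         text = text.replace(f'[{",".join(arr)}]', word, 1)
--         index //= len(arr)
--     last = arrays[-1]
--     return text.replace(f'[{",".join(last)}]', last[index], 1)
-- ===== Notes on version B (the rewrite author's own statement) =====
-- stated objective: simpler
-- what changed: Fuses A's recursive get_words word-decoding and the separate indexed replacement loop into one iterative pass that, per array, picks the word from the running index and replaces its placeholder immediately, updating the index by floor division (no recursion, no intermediate word list, no counter).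
import Mathlib
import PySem

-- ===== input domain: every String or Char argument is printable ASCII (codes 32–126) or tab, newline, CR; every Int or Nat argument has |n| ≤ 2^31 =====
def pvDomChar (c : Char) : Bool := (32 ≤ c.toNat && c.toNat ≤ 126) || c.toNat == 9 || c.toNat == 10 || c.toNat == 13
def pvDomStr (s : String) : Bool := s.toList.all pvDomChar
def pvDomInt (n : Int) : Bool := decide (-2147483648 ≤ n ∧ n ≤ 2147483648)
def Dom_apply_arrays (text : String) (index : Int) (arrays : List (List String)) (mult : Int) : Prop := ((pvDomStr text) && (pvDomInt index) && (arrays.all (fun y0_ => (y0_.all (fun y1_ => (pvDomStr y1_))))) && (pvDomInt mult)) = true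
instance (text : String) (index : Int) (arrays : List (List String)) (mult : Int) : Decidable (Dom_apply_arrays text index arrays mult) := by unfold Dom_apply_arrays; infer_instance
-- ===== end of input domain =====

-- B fuses A's recursive word-decoding (get_words) and its separate indexed replacement loop into
-- one iterative pass over the arrays (objective: simpler). Equal return value on Pre_ (= exactly
-- where the Python A returns without raising).

-- shared primitive: s.replace(old, new, 1) — exact for old ≠ '' (both programs' old starts with '[')
def pyReplace1 (s old new : List Char) : List Char :=
  let i := PySem.Chars.find s old
  if i = -1 then s else s.take i.toNat ++ new ++ s.drop (i.toNat + old.length)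

-- shared primitive: f'[{",".join(arr)}]'
def pvPattern (arr : List String) : List Char :=
  '[' :: PySem.Chars.join [','] (arr.map String.toList) ++ [']']

-- ===== PORT A =====
-- get_words(arrays, totalMult, index); none = a raising run (IndexError / ZeroDivisionError).
-- 'index -= index % len; index /= len; index = math.floor(index)' is exact integer floor division
-- (the dividend is an exact multiple of len), ported as floordiv; math.floor(totalMult/len) is
-- ported as floordiv (exact on the bounded Dom inputs, and totalMult never influences any output).
def get_words (arrays : List (List String)) (totalMult : Int) (index : Int) : Option (List String) :=
  match arrays with
  | [] => none
  | [ws] => (PySem.List.pyGet? ws index).map (fun w => [w])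
  | ws :: rest =>
      match PySem.List.pyGet? ws (PySem.Int.mod index ws.length) with
      | none => none
      | some w =>
          (get_words rest (PySem.Int.floordiv totalMult ws.length)
              (PySem.Int.floordiv (index - PySem.Int.mod index ws.length) ws.length)).map
            (fun l => w :: l)

-- the 'for arr in arrays: text = text.replace(…, chosen_words[i], 1); i = i+1' loop
def applyLoopA (chosen : List String) : List (List String) → List Char → Int → List Char
  | [], t, _ => t
  | arr :: rest, t, i =>
      applyLoopA chosen rest
        (pyReplace1 t (pvPattern arr) ((PySem.List.pyGet? chosen i).getD "").toList) (i + 1)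

def apply_arrays (text : String) (index : Int) (arrays : List (List String)) (mult : Int) : String :=
  if arrays = [] then text
  else
    let index := PySem.Int.mod index mult
    match get_words arrays mult index with
    | none => text   -- unreachable under Pre_: the Python raises here
    | some chosen => String.mk (applyLoopA chosen arrays text.toList 0)

-- ===== PORT B =====
def altLoop : List (List String) → List Char → Int → List Char
  | [], t, _ => t
  | [last], t, idx =>
      pyReplace1 t (pvPattern last) (((PySem.List.pyGet? last idx).getD "").toList)
  | arr :: rest, t, idx =>
      altLoop rest
        (pyReplace1 t (pvPattern arr)
          (((PySem.List.pyGet? arr (PySem.Int.mod idx arr.length)).getD "").toList))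
        (PySem.Int.floordiv idx arr.length)

def apply_arrays_alt (text : String) (index : Int) (arrays : List (List String)) (mult : Int) : String :=
  if arrays = [] then text
  else String.mk (altLoop arrays text.toList (PySem.Int.mod index mult))

-- ===== PRECONDITION & SPEC =====
-- product of the lengths of all arrays but the last
def pvLensProd (arrays : List (List String)) : Int :=
  (arrays.dropLast.map (fun a => (a.length : Int))).prod

-- Exactly where the Python A returns: with a non-empty arrays list it needs mult ≠ 0
-- (ZeroDivisionError), every array non-empty (ZeroDivisionError on len 0), and the fully
-- reduced index (index % mult floor-divided by the product of the non-last lengths) a valid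
-- Python index into the LAST array (no modulo there: IndexError otherwise).
def Pre_apply_arrays (text : String) (index : Int) (arrays : List (List String)) (mult : Int) : Prop :=
  arrays = [] ∨
    (mult ≠ 0 ∧ (∀ a ∈ arrays, a ≠ []) ∧
      PySem.Raise.InRange (arrays.getLastD []).length
        (PySem.Int.floordiv (PySem.Int.mod index mult) (pvLensProd arrays)))
instance (text : String) (index : Int) (arrays : List (List String)) (mult : Int) : Decidable (Pre_apply_arrays text index arrays mult) := by unfold Pre_apply_arrays; infer_instance

def pvWitness_apply_arrays : String × Int × List (List String) × Int :=
  ("pick [a,b] and [c]", 1, [["a", "b"], ["c"]], 6)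

def Spec_apply_arrays (text : String) (index : Int) (arrays : List (List String)) (mult : Int) (out : String) : Prop := out = apply_arrays_alt text index arrays mult
instance (text : String) (index : Int) (arrays : List (List String)) (mult : Int) (out : String) : Decidable (Spec_apply_arrays text index arrays mult out) := by unfold Spec_apply_arrays; infer_instance

-- ===== CLAIM (what is proved, stated in full; the proofs are below) =====
def Claim_equal_apply_arrays : Prop := ∀ (text : String) (index : Int) (arrays : List (List String)) (mult : Int), Dom_apply_arrays text index arrays mult → Pre_apply_arrays text index arrays mult → Spec_apply_arrays text index arrays mult (apply_arrays text index arrays mult)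

-- ===== LEMMAS AND PROOFS =====

theorem pvWitness_ok :
    Dom_apply_arrays (pvWitness_apply_arrays.1) (pvWitness_apply_arrays.2.1) (pvWitness_apply_arrays.2.2.1) (pvWitness_apply_arrays.2.2.2) ∧
    Pre_apply_arrays (pvWitness_apply_arrays.1) (pvWitness_apply_arrays.2.1) (pvWitness_apply_arrays.2.2.1) (pvWitness_apply_arrays.2.2.2) := by
  decide

-- indexing a cons at i+1 (i ≥ 0) is indexing the tail at i
theorem pyGet?_cons_succ {α : Type} (c : α) (cs : List α) (i : Int) (hi : 0 ≤ i) :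
    PySem.List.pyGet? (c :: cs) (i + 1) = PySem.List.pyGet? cs i := by
  obtain ⟨n, rfl⟩ := Int.eq_ofNat_of_zero_le hi
  simp only [PySem.List.pyGet?, PySem.List.pyIdx?, List.length_cons]
  split_ifs with h1 h2 h3 h4 <;> try (exfalso; omega)
  · have : ((n : Int) + 1).toNat = n + 1 := by omega
    simp [this]
  · rfl

-- A's loop at counter i+1 over chosen words c :: ws equals the loop at counter i over ws
theorem applyLoopA_shift (arrs : List (List String)) (c : String) (chosen : List String)
    (t : List Char) (i : Int) (hi : 0 ≤ i) :
    applyLoopA (c :: chosen) arrs t (i + 1) = applyLoopA chosen arrs t i := by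
  induction arrs generalizing t i with
  | nil => rfl
  | cons arr rest ih =>
      simp only [applyLoopA, pyGet?_cons_succ c chosen i hi]
      exact ih _ (i + 1) (by omega)

theorem floordiv_sub_mod (a b : Int) (hb : 0 < b) :
    PySem.Int.floordiv (a - PySem.Int.mod a b) b = PySem.Int.floordiv a b := by
  rw [PySem.Int.mod_eq_emod_of_pos hb, PySem.Int.floordiv_eq_ediv_of_pos hb,
      PySem.Int.floordiv_eq_ediv_of_pos hb]
  have h : a - a % b = b * (a / b) := by have := Int.mul_ediv_add_emod a b; omega
  rw [h, Int.mul_ediv_cancel_left _ hb.ne']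

theorem length_pos_int (x : List String) (h : x ≠ []) : (0 : Int) < x.length := by
  cases x with
  | nil => exact absurd rfl h
  | cons _ _ => exact_mod_cast Nat.succ_pos _

-- core: whenever get_words returns, A's decode-then-replace pass equals B's fused pass
theorem loop_eq (arrays : List (List String)) (tm idx : Int) (chosen : List String)
    (t : List Char) (h : get_words arrays tm idx = some chosen) :
    applyLoopA chosen arrays t 0 = altLoop arrays t idx := by
  induction arrays generalizing tm idx chosen t with
  | nil => simp [get_words] at h
  | cons arr rest ih =>
      cases rest with
      | nil =>
          simp only [get_words, Option.map_eq_some_iff] at h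
          obtain ⟨w, hw, rfl⟩ := h
          simp only [applyLoopA, altLoop]
          rw [hw]
          simp [PySem.List.pyGet?, PySem.List.pyIdx?]
      | cons r rs =>
          rw [show get_words (arr :: r :: rs) tm idx =
              match PySem.List.pyGet? arr (PySem.Int.mod idx arr.length) with
              | none => none
              | some w =>
                  (get_words (r :: rs) (PySem.Int.floordiv tm arr.length)
                      (PySem.Int.floordiv (idx - PySem.Int.mod idx arr.length) arr.length)).map
                    (fun l => w :: l) from rfl] at h
          cases hg : PySem.List.pyGet? arr (PySem.Int.mod idx arr.length) with
          | none => rw [hg] at h; simp at h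
          | some w =>
              rw [hg] at h
              simp only [Option.map_eq_some_iff] at h
              obtain ⟨l, hl, rfl⟩ := h
              have harr : arr ≠ [] := by
                intro he; subst he; simp [PySem.List.pyGet?, PySem.List.pyIdx?] at hg
              have hlen : (0 : Int) < arr.length := length_pos_int arr harr
              rw [show altLoop (arr :: r :: rs) t idx =
                  altLoop (r :: rs)
                    (pyReplace1 t (pvPattern arr)
                      (((PySem.List.pyGet? arr (PySem.Int.mod idx arr.length)).getD "").toList))
                    (PySem.Int.floordiv idx arr.length) from rfl]
              rw [show applyLoopA (w :: l) (arr :: r :: rs) t 0 =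
                  applyLoopA (w :: l) (r :: rs)
                    (pyReplace1 t (pvPattern arr)
                      ((PySem.List.pyGet? (w :: l) 0).getD "").toList) (0 + 1) from rfl]
              rw [applyLoopA_shift _ _ _ _ 0 le_rfl]
              rw [floordiv_sub_mod idx arr.length hlen] at hl
              have h0 : (PySem.List.pyGet? (w :: l) (0 : Int)).getD "" = w := by
                simp [PySem.List.pyGet?, PySem.List.pyIdx?]
              rw [hg, h0]
              exact ih _ _ _ _ hl

theorem pvLensProd_pos (arrays : List (List String)) (h : ∀ a ∈ arrays, a ≠ []) :
    0 < pvLensProd arrays := by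
  apply List.prod_pos
  intro x hx
  obtain ⟨a, ha, rfl⟩ := List.mem_map.mp hx
  exact length_pos_int a (h a (List.dropLast_subset _ ha))

theorem floordiv_floordiv (a b c : Int) (hb : 0 < b) (hc : 0 < c) :
    PySem.Int.floordiv (PySem.Int.floordiv a b) c = PySem.Int.floordiv a (b * c) := by
  rw [PySem.Int.floordiv_eq_ediv_of_pos hb, PySem.Int.floordiv_eq_ediv_of_pos hc,
      PySem.Int.floordiv_eq_ediv_of_pos (mul_pos hb hc)]
  exact Int.ediv_ediv_of_nonneg hb.le

theorem pyGet?_isSome_of_inRange {α : Type} (ws : List α) (idx : Int)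
    (h : PySem.Raise.InRange ws.length idx) : (PySem.List.pyGet? ws idx).isSome := by
  rw [Option.isSome_iff_ne_none]
  intro hn
  exact (PySem.List.pyGet?_eq_none_iff ws idx).mp hn h

-- Pre_'s closed-form index condition makes get_words return
theorem get_words_isSome (arrays : List (List String)) (tm idx : Int) (hne : arrays ≠ [])
    (h1 : ∀ a ∈ arrays, a ≠ [])
    (h2 : PySem.Raise.InRange (arrays.getLastD []).length
        (PySem.Int.floordiv idx (pvLensProd arrays))) :
    (get_words arrays tm idx).isSome := by
  induction arrays generalizing tm idx with
  | nil => exact absurd rfl hne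
  | cons arr rest ih =>
      cases rest with
      | nil =>
          have he : pvLensProd [arr] = 1 := by simp [pvLensProd]
          rw [he, show PySem.Int.floordiv idx 1 = idx from Int.fdiv_one idx] at h2
          have hl : [arr].getLastD [] = arr := rfl
          rw [hl] at h2
          simp only [get_words]
          rw [Option.isSome_map]
          exact pyGet?_isSome_of_inRange arr idx h2
      | cons r rs =>
          have harr : arr ≠ [] := h1 arr (List.mem_cons_self)
          have hlen : (0 : Int) < arr.length := length_pos_int arr harr
          have hmr : PySem.Raise.InRange arr.length (PySem.Int.mod idx arr.length) := by
            constructor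
            · have := PySem.Int.mod_nonneg (a := idx) hlen; omega
            · exact PySem.Int.mod_lt (a := idx) hlen
          obtain ⟨w, hw⟩ := Option.isSome_iff_exists.mp
            (pyGet?_isSome_of_inRange arr (PySem.Int.mod idx arr.length) hmr)
          rw [show get_words (arr :: r :: rs) tm idx =
              match PySem.List.pyGet? arr (PySem.Int.mod idx arr.length) with
              | none => none
              | some w =>
                  (get_words (r :: rs) (PySem.Int.floordiv tm arr.length)
                      (PySem.Int.floordiv (idx - PySem.Int.mod idx arr.length) arr.length)).map
                    (fun l => w :: l) from rfl]
          rw [hw]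
          rw [Option.isSome_map]
          apply ih _ _ (by simp) (fun a ha => h1 a (List.mem_cons_of_mem _ ha))
          · rw [floordiv_sub_mod idx arr.length hlen]
            have hP : 0 < pvLensProd (r :: rs) :=
              pvLensProd_pos _ (fun a ha => h1 a (List.mem_cons_of_mem _ ha))
            rw [floordiv_floordiv idx arr.length (pvLensProd (r :: rs)) hlen hP]
            have hprod : pvLensProd (arr :: r :: rs) = arr.length * pvLensProd (r :: rs) := by
              simp [pvLensProd]
            have hlast : (arr :: r :: rs).getLastD [] = (r :: rs).getLastD [] := by
              simp [List.getLastD]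
            rw [← hprod, ← hlast]
            exact h2

theorem get_words_eq_some (arrays : List (List String)) (tm idx : Int) (hne : arrays ≠ [])
    (h1 : ∀ a ∈ arrays, a ≠ [])
    (h2 : PySem.Raise.InRange (arrays.getLastD []).length
        (PySem.Int.floordiv idx (pvLensProd arrays))) :
    ∃ chosen, get_words arrays tm idx = some chosen := by
  have := get_words_isSome arrays tm idx hne h1 h2
  exact Option.isSome_iff_exists.mp this

-- ===== VERDICT (by name: the statement is the Claim_ definition above) =====
theorem apply_arrays_spec : Claim_equal_apply_arrays := by
  intro text index arrays mult _ hpre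
  unfold Spec_apply_arrays apply_arrays apply_arrays_alt
  rcases hpre with hnil | ⟨hm, h1, h2⟩
  · subst hnil; simp
  · by_cases hne : arrays = []
    · simp [hne]
    · simp only [if_neg hne]
      obtain ⟨chosen, hch⟩ := get_words_eq_some arrays mult (PySem.Int.mod index mult) hne h1 h2
      rw [hch]
      exact congrArg String.mk (loop_eq arrays mult (PySem.Int.mod index mult) chosen text.toList hch)
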